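-- pv_equiv track=rewrite | github.com/JeonBest/AlgorithmPractice | CodingTest/line_2.py | solution
-- ===== SOURCE A (Python) =====
-- def solution(inputArray):
--     answer = [-1] * len(inputArray)
--     monotoneStack = []
--
--     # left to right
--     for idx, inputNum in enumerate(inputArray):
--
--         while len(monotoneStack) > 0 and monotoneStack[-1][1] <= inputNum:
--             monotoneStack.pop()
--
--         if len(monotoneStack) > 0:
--             answer[idx] = monotoneStack[-1][0]
--
--         monotoneStack.append((idx, inputNum))
--
--     monotoneStack.clear()
--     # right to left
--     for reversedIdx, inputNum in enumerate(inputArray[::-1]):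
--         idx = len(inputArray) - reversedIdx - 1
--
--         while len(monotoneStack) > 0 and monotoneStack[-1][1] <= inputNum:
--             monotoneStack.pop()
--
--         if len(monotoneStack) > 0:
--             if answer[idx] == -1 or idx - answer[idx] > monotoneStack[-1][0] - idx:
--                 answer[idx] = monotoneStack[-1][0]
--
--         monotoneStack.append((idx, inputNum))
--
--     return answer
-- ===== SOURCE B (Python) =====
-- def solution(inputArray):
--     n = len(inputArray)
--     res = []
--     for i in range(n):
--         L = next((j for j in range(i - 1, -1, -1) if inputArray[j] > inputArray[i]), -1)
--         R = next((j for j in range(i + 1, n) if inputArray[j] > inputArray[i]), -1)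
--         if L == -1:
--             res.append(R)
--         elif R == -1:
--             res.append(L)
--         elif i - L <= R - i:
--             res.append(L)
--         else:
--             res.append(R)
--     return res
-- ===== Notes on version B (the rewrite author's own statement) =====
-- stated objective: simpler
-- what changed: Replaced the two monotone-stack passes with a direct per-index outward scan: for each i find the nearest strictly greater element on each side and pick the closer one (ties to the left).
import Mathlib
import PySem

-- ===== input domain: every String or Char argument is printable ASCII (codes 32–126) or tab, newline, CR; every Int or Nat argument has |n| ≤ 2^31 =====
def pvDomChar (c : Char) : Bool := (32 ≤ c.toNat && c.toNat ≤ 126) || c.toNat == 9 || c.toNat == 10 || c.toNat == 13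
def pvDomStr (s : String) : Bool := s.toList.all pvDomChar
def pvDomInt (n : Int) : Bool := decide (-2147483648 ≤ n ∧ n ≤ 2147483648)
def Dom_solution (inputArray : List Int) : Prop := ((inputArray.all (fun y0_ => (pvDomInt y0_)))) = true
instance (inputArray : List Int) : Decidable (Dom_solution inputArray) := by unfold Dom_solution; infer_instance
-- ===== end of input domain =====

-- B replaces A's two monotone-stack passes by a per-index outward scan for the nearest strictly
-- greater element on each side (simpler; not faster).

-- ===== PORT A =====

-- the inner `while`: pop while the stack is nonempty and the top's value is <= the current value
def popLE (v : Int) : List (Int × Int) → List (Int × Int)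
  | [] => []
  | (j, x) :: rest => if x ≤ v then popLE v rest else (j, x) :: rest

-- one iteration of the left-to-right loop; p = (idx, inputNum); idx from enumerate is ≥ 0, so .toNat is exact
def leftStep (st : List Int × List (Int × Int)) (p : Int × Int) : List Int × List (Int × Int) :=
  let s := popLE p.2 st.2
  match s with
  | [] => (st.1, (p.1, p.2) :: s)
  | (j, _) :: _ => (st.1.set p.1.toNat j, (p.1, p.2) :: s)

-- one iteration of the right-to-left loop; idx = len - reversedIdx - 1 is always in range, so
-- answer[idx] is List.getD idx.toNat (exact: 0 ≤ idx < len)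
def rightStep (n : Int) (st : List Int × List (Int × Int)) (p : Int × Int) : List Int × List (Int × Int) :=
  let idx := n - p.1 - 1
  let s := popLE p.2 st.2
  match s with
  | [] => (st.1, (idx, p.2) :: s)
  | (j, _) :: _ =>
      if st.1.getD idx.toNat 0 = -1 ∨ idx - st.1.getD idx.toNat 0 > j - idx
      then (st.1.set idx.toNat j, (idx, p.2) :: s)
      else (st.1, (idx, p.2) :: s)

def solution (inputArray : List Int) : List Int :=
  let answer := List.replicate inputArray.length (-1 : Int)
  let st1 := (PySem.List.enumerate inputArray 0).foldl leftStep (answer, [])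
  -- inputArray[::-1]; step -1 is never 0, so slice? is never none
  let rev := (PySem.List.slice? inputArray none none (-1)).getD []
  let st2 := (PySem.List.enumerate rev 0).foldl (rightStep inputArray.length) (st1.1, [])
  st2.1

-- ===== PORT B =====

def solution_alt (inputArray : List Int) : List Int :=
  let n := inputArray.length
  (List.range n).map (fun i =>
    let v := inputArray.getD i 0
    -- L = next((j for j in range(i-1,-1,-1) if inputArray[j] > inputArray[i]), -1)
    let L : Int := (((List.range i).reverse.find? (fun j => v < inputArray.getD j 0)).map
      (fun j => (j : Int))).getD (-1)
    -- R = next((j for j in range(i+1,n) if inputArray[j] > inputArray[i]), -1)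
    let R : Int := (((List.range' (i + 1) (n - (i + 1))).find? (fun j => v < inputArray.getD j 0)).map
      (fun j => (j : Int))).getD (-1)
    if L = -1 then R
    else if R = -1 then L
    else if (i : Int) - L ≤ R - (i : Int) then L
    else R)

-- ===== PRECONDITION & SPEC =====
def Spec_solution (inputArray : List Int) (out : List Int) : Prop := out = solution_alt inputArray
instance (inputArray : List Int) (out : List Int) : Decidable (Spec_solution inputArray out) := by unfold Spec_solution; infer_instance

-- ===== CLAIM (what is proved, stated in full; the proofs are below) =====
def Claim_equal_solution : Prop := ∀ (inputArray : List Int), Dom_solution inputArray → Spec_solution inputArray (solution inputArray)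

-- ===== LEMMAS AND PROOFS =====

-- nearest strictly greater to the left of i, as B computes it
def Lval (a : List Int) (i : Nat) : Int :=
  (((List.range i).reverse.find? (fun j => a.getD i 0 < a.getD j 0)).map (fun j => (j : Int))).getD (-1)

-- nearest strictly greater to the right of i, as B computes it
def Rval (a : List Int) (i : Nat) : Int :=
  (((List.range' (i + 1) (a.length - (i + 1))).find? (fun j => a.getD i 0 < a.getD j 0)).map
    (fun j => (j : Int))).getD (-1)

-- B's per-index output
def comb (a : List Int) (i : Nat) : Int :=
  if Lval a i = -1 then Rval a i
  else if Rval a i = -1 then Lval a i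
  else if (i : Int) - Lval a i ≤ Rval a i - (i : Int) then Lval a i
  else Rval a i

lemma solution_alt_eq_map (a : List Int) :
    solution_alt a = (List.range a.length).map (comb a) := by
  simp [solution_alt, comb, Lval, Rval]

-- the left-pass stack after processing indices 0..i-1
def stkL (a : List Int) : Nat → List (Int × Int)
  | 0 => []
  | i + 1 => ((i : Int), a.getD i 0) :: popLE (a.getD i 0) (stkL a i)

-- the right-pass stack after processing reversed indices 0..r-1 (i.e. positions n-1 down to n-r)
def stkR (a : List Int) : Nat → List (Int × Int)
  | 0 => []
  | r + 1 => (((a.length - r - 1 : Nat) : Int), a.getD (a.length - r - 1) 0) ::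
      popLE (a.getD (a.length - r - 1) 0) (stkR a r)

lemma popLE_popLE (v w : Int) (h : w ≤ v) (s : List (Int × Int)) :
    popLE v (popLE w s) = popLE v s := by
  induction s with
  | nil => rfl
  | cons p rest ih =>
      obtain ⟨j, x⟩ := p
      by_cases hx : x ≤ w
      · simp [popLE, hx, le_trans hx h, ih]
      · simp [popLE, hx]

lemma head_popLE_stkL (a : List Int) (v : Int) : ∀ i,
    (popLE v (stkL a i)).head? =
      ((List.range i).reverse.find? (fun j => v < a.getD j 0)).map
        (fun (j : Nat) => ((j : Int), a.getD j 0)) := by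
  intro i
  induction i with
  | zero => simp [stkL, popLE]
  | succ i ih =>
      rw [List.range_succ, List.reverse_append, List.reverse_singleton, List.singleton_append]
      by_cases h : v < a.getD i 0
      · rw [List.find?_cons_of_pos (by simpa using h)]
        simp only [stkL, popLE, if_neg (not_le.mpr h), List.head?_cons, Option.map_some]
      · rw [List.find?_cons_of_neg (by simpa using h)]
        rw [stkL]
        simp only [popLE]
        rw [if_pos (not_lt.mp h), popLE_popLE v _ (not_lt.mp h), ih]

lemma head_popLE_stkR (a : List Int) (v : Int) : ∀ r, r ≤ a.length →
    (popLE v (stkR a r)).head? =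
      ((List.range' (a.length - r) r).find? (fun j => v < a.getD j 0)).map
        (fun (j : Nat) => ((j : Int), a.getD j 0)) := by
  intro r
  induction r with
  | zero => simp [stkR, popLE]
  | succ r ih =>
      intro hr
      have h1 : a.length - (r + 1) + 1 = a.length - r := by omega
      have h2 : a.length - r - 1 = a.length - (r + 1) := by omega
      rw [List.range'_succ, h1]
      by_cases h : v < a.getD (a.length - r - 1) 0
      · rw [List.find?_cons_of_pos (by rw [← h2]; simpa using h)]
        rw [h2] at h
        simp only [stkR, popLE, h2, if_neg (not_le.mpr h), List.head?_cons, Option.map_some]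
      · rw [List.find?_cons_of_neg (by rw [← h2]; simpa using h)]
        rw [h2] at h
        rw [stkR]
        simp only [popLE, h2]
        rw [if_pos (not_lt.mp h), popLE_popLE v _ (not_lt.mp h), ih (by omega)]

-- the left pass over the first i elements
lemma leftInv (a : List Int) : ∀ i, i ≤ a.length →
    (PySem.List.enumerate (a.take i) 0).foldl leftStep (List.replicate a.length (-1 : Int), []) =
      ((List.range a.length).map (fun j => if j < i then Lval a j else -1), stkL a i) := by
  intro i
  induction i with
  | zero =>
      intro _
      refine Prod.ext ?_ rfl
      simp
  | succ i ih =>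
      intro hi
      have hlt : i < a.length := by omega
      have htake : a.take (i + 1) = a.take i ++ [a.getD i 0] := by
        rw [List.take_add_one]
        congr 1
        simp [List.getD, List.getElem?_eq_getElem hlt]
      rw [htake, PySem.List.enumerate_append, List.foldl_append, ih (by omega)]
      have hlen : (a.take i).length = i := by simp [hlt.le]
      rw [hlen, PySem.List.enumerate_cons, PySem.List.enumerate_nil,
        List.foldl_cons, List.foldl_nil]
      have hhead := head_popLE_stkL a (a.getD i 0) i
      cases hs : popLE (a.getD i 0) (stkL a i) with
      | nil =>
          rw [hs] at hhead
          have hfind : (List.range i).reverse.find? (fun j => a.getD i 0 < a.getD j 0) = none :=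
            Option.map_eq_none_iff.mp hhead.symm
          have hLv : Lval a i = -1 := by unfold Lval; rw [hfind]; rfl
          simp only [leftStep, hs]
          refine Prod.ext ?_ ?_
          · show ((List.range a.length).map (fun j => if j < i then Lval a j else -1)) = _
            refine List.map_congr_left (fun j hj => ?_)
            rcases Nat.lt_or_ge j i with h | h
            · simp [h, Nat.lt_succ_of_lt h]
            · have h1 : ¬ j < i := by omega
              by_cases h2 : j < i + 1
              · have : j = i := by omega
                simp [this, hLv]
              · simp [h1, h2]
          · show ((0 : Int) + (i : Int), a.getD i 0) :: [] = stkL a (i + 1)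
            rw [stkL, hs]
            norm_num
      | cons p rest =>
          cases hf2 : (List.range i).reverse.find? (fun j => a.getD i 0 < a.getD j 0) with
          | none => rw [hs, hf2] at hhead; simp at hhead
          | some j0 =>
              rw [hs, hf2] at hhead
              simp only [List.head?_cons, Option.map_some, Option.some_inj] at hhead
              have hLv : Lval a i = (j0 : Int) := by unfold Lval; rw [hf2]; rfl
              simp only [leftStep, hs]
              refine Prod.ext ?_ ?_
              · show (((List.range a.length).map (fun j => if j < i then Lval a j else -1)).set
                  ((0 : Int) + (i : Int)).toNat p.1) = _
                have hp1 : p.1 = (j0 : Int) := by rw [hhead]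
                have htn : ((0 : Int) + (i : Int)).toNat = i := by norm_num
                rw [hp1, htn]
                refine List.ext_getElem (by simp) (fun k hk1 hk2 => ?_)
                have hk : k < a.length := by simpa using hk2
                rw [List.getElem_set]
                simp only [List.getElem_map, List.getElem_range]
                by_cases hki : k = i
                · subst hki
                  simp [hLv]
                · have hik : ¬ i = k := fun h => hki h.symm
                  rcases Nat.lt_or_ge k i with h | h
                  · simp [hik, h, Nat.lt_succ_of_lt h]
                  · have h1 : ¬ k < i := by omega
                    have h2 : ¬ k < i + 1 := by omega
                    simp [hik, h1, h2]
              · show ((0 : Int) + (i : Int), a.getD i 0) :: p :: rest = stkL a (i + 1)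
                rw [stkL, hs]
                norm_num

-- the right pass over the first r reversed elements
lemma rightInv (a : List Int) : ∀ r, r ≤ a.length →
    (PySem.List.enumerate (a.reverse.take r) 0).foldl (rightStep a.length)
        ((List.range a.length).map (Lval a), []) =
      ((List.range a.length).map
          (fun j => if a.length - r ≤ j then comb a j else Lval a j), stkR a r) := by
  intro r
  induction r with
  | zero =>
      intro _
      refine Prod.ext ?_ rfl
      show (List.range a.length).map (Lval a) = _
      refine List.map_congr_left (fun j hj => ?_)
      have : ¬ a.length ≤ j := by have := List.mem_range.mp hj; omega
      simp [this]
  | succ r ih =>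
      intro hr
      have hlt : r < a.length := by omega
      have hrevlt : r < a.reverse.length := by simpa using hlt
      have hgrev : a.reverse.getD r 0 = a.getD (a.length - r - 1) 0 := by
        have h1 : a.length - r - 1 < a.length := by omega
        simp [List.getD, List.getElem?_eq_getElem hrevlt, List.getElem?_eq_getElem h1,
          List.getElem_reverse]
        congr 1
        omega
      have htake : a.reverse.take (r + 1) = a.reverse.take r ++ [a.getD (a.length - r - 1) 0] := by
        rw [List.take_add_one]
        congr 1
        rw [← hgrev]
        simp [List.getD, List.getElem?_eq_getElem hrevlt]
      rw [htake, PySem.List.enumerate_append, List.foldl_append, ih (by omega)]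
      have hlen : (a.reverse.take r).length = r := by simp [hlt.le]
      rw [hlen, PySem.List.enumerate_cons, PySem.List.enumerate_nil,
        List.foldl_cons, List.foldl_nil]
      have hidx : (a.length : Int) - (0 + (r : Int)) - 1 = ((a.length - r - 1 : Nat) : Int) := by
        omega
      have hhead := head_popLE_stkR a (a.getD (a.length - r - 1) 0) r (by omega)
      have he1 : a.length - r - 1 + 1 = a.length - r := by omega
      have he2 : a.length - (a.length - r) = r := by omega
      have hidxlt : a.length - r - 1 < a.length := by omega
      have hgetD : ∀ f : Nat → Int,
          ((List.range a.length).map f).getD (a.length - r - 1) 0 = f (a.length - r - 1) := by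
        intro f
        simp [List.getD, List.getElem?_map, List.getElem?_range hidxlt]
      cases hs : popLE (a.getD (a.length - r - 1) 0) (stkR a r) with
      | nil =>
          rw [hs] at hhead
          have hfind : (List.range' (a.length - r) r).find?
              (fun j => a.getD (a.length - r - 1) 0 < a.getD j 0) = none :=
            Option.map_eq_none_iff.mp hhead.symm
          have hRv : Rval a (a.length - r - 1) = -1 := by
            unfold Rval; rw [he1, he2, hfind]; rfl
          have hcomb : comb a (a.length - r - 1) = Lval a (a.length - r - 1) := by
            unfold comb; rw [hRv]
            by_cases hLz : Lval a (a.length - r - 1) = -1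
            · simp [hLz]
            · simp [hLz]
          simp only [rightStep, hidx, hs]
          refine Prod.ext ?_ ?_
          · show (List.range a.length).map (fun j => if a.length - r ≤ j then comb a j else Lval a j) = _
            refine List.map_congr_left (fun j hj => ?_)
            have hjn := List.mem_range.mp hj
            by_cases hge : a.length - r ≤ j
            · have : a.length - (r + 1) ≤ j := by omega
              simp [hge, this]
            · by_cases hge2 : a.length - (r + 1) ≤ j
              · have hj' : j = a.length - r - 1 := by omega
                simp [hj', hcomb]
              · simp [hge, hge2]
          · show (((a.length - r - 1 : Nat) : Int), a.getD (a.length - r - 1) 0) :: [] = stkR a (r + 1)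
            rw [stkR, hs]
      | cons p rest =>
          cases hf2 : (List.range' (a.length - r) r).find?
              (fun j => a.getD (a.length - r - 1) 0 < a.getD j 0) with
          | none => rw [hs, hf2] at hhead; simp at hhead
          | some j0 =>
              rw [hs, hf2] at hhead
              simp only [List.head?_cons, Option.map_some, Option.some_inj] at hhead
              have hRv : Rval a (a.length - r - 1) = (j0 : Int) := by
                unfold Rval; rw [he1, he2, hf2]; rfl
              have hj0ne : ((j0 : Nat) : Int) ≠ -1 := by omega
              simp only [rightStep, hidx, Int.toNat_natCast, hs]
              rw [hgetD]
              rw [if_neg (show ¬ a.length - r ≤ a.length - r - 1 by omega)]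
              have hp1 : p.1 = (j0 : Int) := by rw [hhead]
              rw [hp1]
              by_cases hC : Lval a (a.length - r - 1) = -1 ∨
                  ((a.length - r - 1 : Nat) : Int) - Lval a (a.length - r - 1) >
                    (j0 : Int) - ((a.length - r - 1 : Nat) : Int)
              · have hcomb : comb a (a.length - r - 1) = (j0 : Int) := by
                  unfold comb; rw [hRv]
                  rcases hC with hC | hC
                  · simp [hC]
                  · by_cases hLz : Lval a (a.length - r - 1) = -1
                    · simp [hLz]
                    · simp [hLz, hj0ne, not_le.mpr hC]
                rw [if_pos hC]
                refine Prod.ext ?_ ?_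
                · show ((List.range a.length).map
                      (fun j => if a.length - r ≤ j then comb a j else Lval a j)).set
                      (a.length - r - 1) (j0 : Int) = _
                  refine List.ext_getElem (by simp) (fun k hk1 hk2 => ?_)
                  have hk : k < a.length := by simpa using hk2
                  rw [List.getElem_set]
                  simp only [List.getElem_map, List.getElem_range]
                  by_cases hki : a.length - r - 1 = k
                  · subst hki
                    have hge2 : a.length - (r + 1) ≤ a.length - r - 1 := by omega
                    simp [hge2, hcomb]
                  · have hiff : (a.length - r ≤ k) ↔ (a.length - (r + 1) ≤ k) := by omega
                    by_cases hge : a.length - r ≤ k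
                    · simp [hki, hge, hiff.mp hge]
                    · have : ¬ a.length - (r + 1) ≤ k := fun h => hge (by omega)
                      simp [hki, hge, this]
                · show (((a.length - r - 1 : Nat) : Int), a.getD (a.length - r - 1) 0) :: p :: rest
                      = stkR a (r + 1)
                  rw [stkR, hs]
              · have hL1 : Lval a (a.length - r - 1) ≠ -1 := fun h => hC (Or.inl h)
                have hL2 : ¬ ((a.length - r - 1 : Nat) : Int) - Lval a (a.length - r - 1) >
                    (j0 : Int) - ((a.length - r - 1 : Nat) : Int) := fun h => hC (Or.inr h)
                have hcomb : comb a (a.length - r - 1) = Lval a (a.length - r - 1) := by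
                  unfold comb; rw [hRv]
                  simp [hL1, hj0ne, not_lt.mp hL2]
                rw [if_neg hC]
                refine Prod.ext ?_ ?_
                · show (List.range a.length).map
                      (fun j => if a.length - r ≤ j then comb a j else Lval a j) = _
                  refine List.map_congr_left (fun j hj => ?_)
                  have hjn := List.mem_range.mp hj
                  by_cases hge : a.length - r ≤ j
                  · have : a.length - (r + 1) ≤ j := by omega
                    simp [hge, this]
                  · by_cases hge2 : a.length - (r + 1) ≤ j
                    · have hj' : j = a.length - r - 1 := by omega
                      simp [hj', hcomb]
                    · simp [hge, hge2]
                · show (((a.length - r - 1 : Nat) : Int), a.getD (a.length - r - 1) 0) :: p :: rest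
                      = stkR a (r + 1)
                  rw [stkR, hs]

theorem solution_eq (a : List Int) : solution a = solution_alt a := by
  have hL := leftInv a a.length le_rfl
  have hR := rightInv a a.length le_rfl
  rw [List.take_length] at hL
  have htk : a.reverse.take a.length = a.reverse := by simp
  rw [htk] at hR
  have hmap1 : (List.range a.length).map (fun j => if j < a.length then Lval a j else -1)
      = (List.range a.length).map (Lval a) :=
    List.map_congr_left (fun j hj => by simp [List.mem_range.mp hj])
  have hmap2 : (List.range a.length).map
        (fun j => if a.length - a.length ≤ j then comb a j else Lval a j)
      = (List.range a.length).map (comb a) :=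
    List.map_congr_left (fun j hj => by simp)
  rw [hmap1] at hL
  rw [hmap2] at hR
  show ((PySem.List.enumerate ((PySem.List.slice? a none none (-1)).getD []) 0).foldl
      (rightStep a.length)
      (((PySem.List.enumerate a 0).foldl leftStep (List.replicate a.length (-1 : Int), [])).1,
        [])).1 = _
  rw [PySem.List.slice?_none_none_neg_one, hL, Option.getD_some, hR, solution_alt_eq_map]

-- ===== VERDICT (by name: the statement is the Claim_ definition above) =====
theorem solution_spec : Claim_equal_solution := by
  intro a _
  unfold Spec_solution
  exact solution_eq a
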